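-- pv_equiv track=rewrite | github.com/collect1on/Human-Fall-Detection-System | computer program/main.py | group_continuous_less_than_10
-- ===== SOURCE A (Python) =====
-- def group_continuous_less_than_10(array):
--     groups = []
--     current_group = [array[0]]
--
--     for i in range(1, len(array)):
--         # 檢查與前一個元素的差是否小於10
--         if array[i] - current_group[-1] < 150:
--             current_group.append(array[i])
--         else:
--             groups.append(current_group)
--             current_group = [array[i]]
--
--     # 將最後一個組添加到groups中
--     groups.append(current_group)
--
--     return groups
-- ===== SOURCE B (Python) =====
-- def group_continuous_less_than_10(array):
--     breaks = [i for i in range(1, len(array)) if array[i] - array[i - 1] >= 150]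
--     bounds = [0] + breaks + [len(array)]
--     return [array[bounds[j]:bounds[j + 1]] for j in range(len(bounds) - 1)]
-- ===== Notes on version B (the rewrite author's own statement) =====
-- stated objective: alternative
-- what changed: B first collects the break indices where a step is >= 150 in one comprehension and then rebuilds each group as a slice of the original array between successive bounds, instead of A's single stateful loop that grows a current group element by element.
import Mathlib
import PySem

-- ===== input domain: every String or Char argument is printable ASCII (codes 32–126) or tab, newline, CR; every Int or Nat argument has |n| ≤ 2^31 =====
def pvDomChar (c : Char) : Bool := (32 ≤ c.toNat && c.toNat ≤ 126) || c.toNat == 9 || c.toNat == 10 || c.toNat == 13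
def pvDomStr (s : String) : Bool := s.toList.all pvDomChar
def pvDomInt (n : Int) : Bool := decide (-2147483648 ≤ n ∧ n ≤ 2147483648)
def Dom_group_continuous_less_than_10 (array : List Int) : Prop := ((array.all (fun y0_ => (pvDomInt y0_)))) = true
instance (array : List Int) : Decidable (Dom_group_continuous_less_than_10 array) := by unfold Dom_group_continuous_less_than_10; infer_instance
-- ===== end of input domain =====

-- B rebuilds the groups from the list of break indices and slices of the original
-- array instead of growing a current group element by element (objective: alternative).

-- ===== PORT A =====
def group_continuous_less_than_10 (array : List Int) : List (List Int) :=
  -- groups = []; current_group = [array[0]]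
  -- for i in range(1, len(array)): …
  let st := (PySem.List.pyRange 1 (array.length : Int) 1).foldl
    (fun st i =>
      if PySem.List.pyGetD array i 0 - PySem.List.pyGetD st.2 (-1) 0 < 150 then
        (st.1, st.2 ++ [PySem.List.pyGetD array i 0])
      else
        (st.1 ++ [st.2], [PySem.List.pyGetD array i 0]))
    (([] : List (List Int)), [PySem.List.pyGetD array 0 0])
  st.1 ++ [st.2]

-- ===== PORT B =====
-- breaks = [i for i in range(1, len(array)) if array[i] - array[i-1] >= 150]
def pvBreaks (array : List Int) : List Int :=
  (PySem.List.pyRange 1 (array.length : Int) 1).filter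
    (fun i => decide (150 ≤ PySem.List.pyGetD array i 0 - PySem.List.pyGetD array (i - 1) 0))

-- bounds = [0] + breaks + [len(array)]
def pvBounds (array : List Int) : List Int :=
  0 :: (pvBreaks array ++ [(array.length : Int)])

-- [array[bounds[j]:bounds[j+1]] for j in range(len(bounds) - 1)]
def group_continuous_less_than_10_alt (array : List Int) : List (List Int) :=
  (PySem.List.pyRange 0 (((pvBounds array).length : Int) - 1) 1).map
    (fun j => PySem.List.slice array (some (PySem.List.pyGetD (pvBounds array) j 0))
                                     (some (PySem.List.pyGetD (pvBounds array) (j + 1) 0)))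

-- ===== PRECONDITION & SPEC =====
-- Pre_ excludes only the empty list, on which A raises IndexError (array[0]).
def Pre_group_continuous_less_than_10 (array : List Int) : Prop := array ≠ []
instance (array : List Int) : Decidable (Pre_group_continuous_less_than_10 array) := by
  unfold Pre_group_continuous_less_than_10; infer_instance

def pvWitness_group_continuous_less_than_10 : List Int := [3, 500, 510, 999]

def Spec_group_continuous_less_than_10 (array : List Int) (out : List (List Int)) : Prop :=
  out = group_continuous_less_than_10_alt array
instance (array : List Int) (out : List (List Int)) : Decidable (Spec_group_continuous_less_than_10 array out) := by
  unfold Spec_group_continuous_less_than_10; infer_instance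

-- ===== CLAIM (what is proved, stated in full; the proofs are below) =====
def Claim_equal_group_continuous_less_than_10 : Prop :=
  ∀ (array : List Int), Dom_group_continuous_less_than_10 array →
    Pre_group_continuous_less_than_10 array →
    Spec_group_continuous_less_than_10 array (group_continuous_less_than_10 array)

-- ===== LEMMAS AND PROOFS =====

def pvStepA (st : List (List Int) × List Int) (x : Int) : List (List Int) × List Int :=
  if x - PySem.List.pyGetD st.2 (-1) 0 < 150 then (st.1, st.2 ++ [x])
  else (st.1 ++ [st.2], [x])

def grpA : Int → List Int → List (List Int)
  | _, [] => [[]]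
  | p, x :: xs =>
    let r := grpA x xs
    if x - p < 150 then (x :: r.headI) :: r.tail
    else [] :: (x :: r.headI) :: r.tail

def pairsMap (F : Int → Int → List Int) : List Int → List (List Int)
  | a :: b :: l => F a b :: pairsMap F (b :: l)
  | _ => []

theorem pvGetD_cons_shift (x : Int) (l : List Int) (i : Int) (hi : 0 ≤ i) :
    PySem.List.pyGetD (x :: l) (i + 1) 0 = PySem.List.pyGetD l i 0 := by
  obtain ⟨n, rfl⟩ := Int.eq_ofNat_of_zero_le hi
  have h1 : ((n : Int) + 1) = ((n + 1 : Nat) : Int) := by push_cast; ring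
  rw [h1, PySem.List.pyGetD_natCast, PySem.List.pyGetD_natCast]
  simp

theorem pvGetD_one_cons (x y : Int) (l : List Int) :
    PySem.List.pyGetD (x :: y :: l) 1 0 = y := by
  have := pvGetD_cons_shift x (y :: l) 0 le_rfl
  simpa using this

theorem pvRange_shift (a b : Int) :
    PySem.List.pyRange (a + 1) (b + 1) 1 = (PySem.List.pyRange a b 1).map (· + 1) := by
  rw [PySem.List.pyRange_one, PySem.List.pyRange_one, List.map_map]
  have h : (b + 1 - (a + 1)) = b - a := by ring
  rw [h]
  apply List.map_congr_left
  intro k _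
  simp; ring

theorem pvBreaks_nonneg (t : List Int) (a : Int) (ha : a ∈ pvBreaks t) : 1 ≤ a := by
  unfold pvBreaks at ha
  have := List.mem_of_mem_filter ha
  exact (PySem.List.mem_pyRange_one.mp this).1

theorem pvBreaks_cons (x y : Int) (t : List Int) :
    pvBreaks (x :: y :: t)
      = (if 150 ≤ y - x then [1] else []) ++ (pvBreaks (y :: t)).map (· + 1) := by
  unfold pvBreaks
  have hlen : (((x :: y :: t).length : Int)) = ((y :: t).length : Int) + 1 := by
    simp
  rw [hlen]
  have hpos : (1 : Int) < ((y :: t).length : Int) + 1 := by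
    have : (1 : Int) ≤ ((y :: t).length : Int) := by simp
    omega
  rw [PySem.List.pyRange_one_cons hpos]
  have h2 : PySem.List.pyRange (1 + 1) (((y :: t).length : Int) + 1) 1
      = (PySem.List.pyRange 1 ((y :: t).length : Int) 1).map (· + 1) := pvRange_shift 1 _
  rw [h2, List.filter_cons]
  have hc1 : (decide (150 ≤ PySem.List.pyGetD (x :: y :: t) 1 0 - PySem.List.pyGetD (x :: y :: t) (1 - 1) 0))
      = decide (150 ≤ y - x) := by
    rw [pvGetD_one_cons]
    norm_num [PySem.List.pyGetD_zero_cons]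
  rw [hc1]
  rw [List.filter_map]
  have hcong : ∀ i ∈ PySem.List.pyRange 1 ((y :: t).length : Int) 1,
      ((fun i => decide (150 ≤ PySem.List.pyGetD (x :: y :: t) i 0 - PySem.List.pyGetD (x :: y :: t) (i - 1) 0)) ∘ (· + 1)) i
        = decide (150 ≤ PySem.List.pyGetD (y :: t) i 0 - PySem.List.pyGetD (y :: t) (i - 1) 0) := by
    intro i hi
    have h1 : (1 : Int) ≤ i := (PySem.List.mem_pyRange_one.mp hi).1
    simp only [Function.comp]
    rw [show i + 1 - 1 = (i - 1) + 1 by ring]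
    rw [pvGetD_cons_shift x (y :: t) i (by omega), pvGetD_cons_shift x (y :: t) (i - 1) (by omega)]
  rw [List.filter_congr hcong]
  by_cases hxy : 150 ≤ y - x <;> simp [hxy]

theorem pvPairs_eq (F : Int → Int → List Int) :
    ∀ (l : List Int) (a : Int),
      (PySem.List.pyRange 0 ((l.length : Int)) 1).map
          (fun j => F (PySem.List.pyGetD (a :: l) j 0) (PySem.List.pyGetD (a :: l) (j + 1) 0))
        = pairsMap F (a :: l) := by
  intro l
  induction l with
  | nil =>
    intro a
    rw [PySem.List.pyRange_one_eq_nil (by simp)]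
    simp [pairsMap]
  | cons b l' ih =>
    intro a
    have hlen : (((b :: l').length : Int)) = ((l'.length : Int)) + 1 := by simp
    rw [hlen]
    have hpos : (0 : Int) < (l'.length : Int) + 1 := by positivity
    rw [PySem.List.pyRange_one_cons hpos]
    have h2 : PySem.List.pyRange (0 + 1) ((l'.length : Int) + 1) 1
        = (PySem.List.pyRange 0 (l'.length : Int) 1).map (· + 1) := pvRange_shift 0 _
    rw [List.map_cons, h2, List.map_map]
    have hhead : F (PySem.List.pyGetD (a :: b :: l') 0 0) (PySem.List.pyGetD (a :: b :: l') (0 + 1) 0)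
        = F a b := by
      rw [PySem.List.pyGetD_zero_cons]
      rw [show (0 : Int) + 1 = 1 by ring, pvGetD_one_cons]
    rw [hhead]
    have hcong : ∀ j ∈ PySem.List.pyRange 0 (l'.length : Int) 1,
        ((fun j => F (PySem.List.pyGetD (a :: b :: l') j 0) (PySem.List.pyGetD (a :: b :: l') (j + 1) 0)) ∘ (· + 1)) j
          = F (PySem.List.pyGetD (b :: l') j 0) (PySem.List.pyGetD (b :: l') (j + 1) 0) := by
      intro j hj
      have h0 : (0 : Int) ≤ j := (PySem.List.mem_pyRange_one.mp hj).1
      simp only [Function.comp]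
      rw [pvGetD_cons_shift a (b :: l') j h0]
      rw [show j + 1 + 1 = (j + 1) + 1 by ring, pvGetD_cons_shift a (b :: l') (j + 1) (by omega)]
    rw [List.map_congr_left hcong]
    rw [ih b]
    rfl

theorem pvB_eq_pairs (array : List Int) :
    group_continuous_less_than_10_alt array
      = pairsMap (fun a b => PySem.List.slice array (some a) (some b)) (pvBounds array) := by
  unfold group_continuous_less_than_10_alt
  have h : (((pvBounds array).length : Int) - 1) = (((pvBreaks array ++ [(array.length : Int)]).length : Int)) := by
    simp [pvBounds]
  rw [h]
  rw [show pvBounds array = 0 :: (pvBreaks array ++ [(array.length : Int)]) from rfl]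
  exact pvPairs_eq (fun a b => PySem.List.slice array (some a) (some b)) (pvBreaks array ++ [(array.length : Int)]) 0

theorem pvSlice_shift (x : Int) (t : List Int) (a b : Int) (ha : 0 ≤ a) (hb : 0 ≤ b) :
    PySem.List.slice (x :: t) (some (a + 1)) (some (b + 1))
      = PySem.List.slice t (some a) (some b) := by
  rw [PySem.List.slice_toNat _ (by omega : (0:Int) ≤ a + 1) (by omega : (0:Int) ≤ b + 1), PySem.List.slice_toNat _ ha hb]
  have h1 : (a + 1).toNat = a.toNat + 1 := by omega
  have h2 : (b + 1).toNat = b.toNat + 1 := by omega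
  rw [h1, h2, List.drop_succ_cons]
  congr 1
  omega

theorem pvSlice_zero_cons (x : Int) (t : List Int) (b : Int) (hb : 0 ≤ b) :
    PySem.List.slice (x :: t) (some 0) (some (b + 1))
      = x :: PySem.List.slice t (some 0) (some b) := by
  rw [PySem.List.slice_toNat _ (by omega : (0:Int) ≤ (0:Int)) (by omega : (0:Int) ≤ b + 1), PySem.List.slice_toNat _ le_rfl hb]
  have h2 : (b + 1).toNat = b.toNat + 1 := by omega
  simp [h2, List.take_succ_cons]

theorem pvSlice_zero_one (x : Int) (t : List Int) :
    PySem.List.slice (x :: t) (some 0) (some 1) = [x] := by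
  rw [PySem.List.slice_toNat _ le_rfl (by omega : (0:Int) ≤ 1)]
  simp

theorem pvPairs_shift (x : Int) (t : List Int) :
    ∀ (l : List Int), (∀ a ∈ l, 0 ≤ a) →
      pairsMap (fun a b => PySem.List.slice (x :: t) (some a) (some b)) (l.map (· + 1))
        = pairsMap (fun a b => PySem.List.slice t (some a) (some b)) l := by
  intro l
  induction l with
  | nil => intro _; rfl
  | cons a l ih =>
    intro hpos
    cases l with
    | nil => rfl
    | cons b l' =>
      simp only [List.map_cons, pairsMap]
      rw [pvSlice_shift x t a b (hpos a (by simp)) (hpos b (by simp))]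
      rw [show (b + 1) :: List.map (fun x => x + 1) l' = List.map (fun x => x + 1) (b :: l') from rfl]
      rw [ih (fun a ha => hpos a (by simp [ha]))]

theorem pvB_struct (x y : Int) (t : List Int) :
    group_continuous_less_than_10_alt (x :: y :: t)
      = if y - x < 150 then
          (x :: (group_continuous_less_than_10_alt (y :: t)).headI)
            :: (group_continuous_less_than_10_alt (y :: t)).tail
        else [x] :: group_continuous_less_than_10_alt (y :: t) := by
  rw [pvB_eq_pairs, pvB_eq_pairs]
  have hnn : ∀ a ∈ (0 : Int) :: (pvBreaks (y :: t) ++ [((y :: t).length : Int)]), 0 ≤ a := by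
    intro a ha
    rcases List.mem_cons.mp ha with h | h
    · omega
    rcases List.mem_append.mp h with h | h
    · have := pvBreaks_nonneg _ _ h; omega
    · simp at h; omega
  have hblen : pvBounds (x :: y :: t)
      = 0 :: (((if 150 ≤ y - x then [1] else []) ++ (pvBreaks (y :: t)).map (· + 1))
          ++ [(((y :: t).length : Int)) + 1]) := by
    rw [show pvBounds (x :: y :: t) = 0 :: (pvBreaks (x :: y :: t) ++ [(((x :: y :: t).length : Int))]) from rfl]
    rw [pvBreaks_cons]
    congr 2
  by_cases hc : y - x < 150
  · -- no break at index 1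
    have hnb : ¬ (150 ≤ y - x) := by omega
    rw [hblen]
    simp only [hnb, if_false, List.nil_append, if_pos hc]
    have hmap : (pvBreaks (y :: t)).map (· + 1) ++ [(((y :: t).length : Int)) + 1]
        = ((pvBreaks (y :: t) ++ [((y :: t).length : Int)]).map (· + 1)) := by
      simp
    rw [hmap]
    obtain ⟨h, r, hr⟩ : ∃ h r, pvBreaks (y :: t) ++ [((y :: t).length : Int)] = h :: r := by
      cases hpb : pvBreaks (y :: t) with
      | nil => exact ⟨_, _, rfl⟩
      | cons c cs => exact ⟨_, _, rfl⟩
    rw [hr]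
    have h0h : (0 : Int) ≤ h := by
      have : h ∈ (0 : Int) :: (pvBreaks (y :: t) ++ [((y :: t).length : Int)]) := by
        rw [hr]; simp
      exact hnn h this
    rw [show pvBounds (y :: t) = 0 :: (pvBreaks (y :: t) ++ [(((y :: t).length : Int))]) from rfl, hr]
    simp only [List.map_cons, pairsMap, List.headI, List.tail]
    rw [pvSlice_zero_cons x (y :: t) h h0h]
    rw [show ((h + 1) :: List.map (fun x => x + 1) r) = List.map (fun x => x + 1) (h :: r) from rfl]
    rw [pvPairs_shift x (y :: t) (h :: r) (by intro a ha; exact hnn a (by rw [hr]; simp [ha]))]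
  · have hb : (150 ≤ y - x) := by omega
    rw [hblen]
    simp only [hb, if_true, if_neg hc]
    have hmap : (pvBreaks (y :: t)).map (· + 1) ++ [(((y :: t).length : Int)) + 1]
        = ((pvBreaks (y :: t) ++ [((y :: t).length : Int)]).map (· + 1)) := by
      simp
    rw [show ([1] ++ (pvBreaks (y :: t)).map (· + 1)) ++ [(((y :: t).length : Int)) + 1]
        = 1 :: ((pvBreaks (y :: t)).map (· + 1) ++ [(((y :: t).length : Int)) + 1]) by simp]
    rw [hmap]
    simp only [pairsMap]
    rw [pvSlice_zero_one]
    rw [show ((1 : Int) :: List.map (fun x => x + 1) (pvBreaks (y :: t) ++ [(((y :: t).length : Int))]))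
        = List.map (fun x => x + 1) (0 :: (pvBreaks (y :: t) ++ [(((y :: t).length : Int))])) by simp]
    rw [pvPairs_shift x (y :: t) _ hnn]
    rfl

theorem pvA_inv :
    ∀ (xs : List Int) (g : List (List Int)) (c : List Int) (p : Int),
      PySem.List.pyGetD c (-1) 0 = p →
      (xs.foldl pvStepA (g, c)).1 ++ [(xs.foldl pvStepA (g, c)).2]
        = g ++ (c ++ (grpA p xs).headI) :: (grpA p xs).tail := by
  intro xs
  induction xs with
  | nil => intro g c p hp; simp [grpA]
  | cons x xs ih =>
    intro g c p hp
    rw [List.foldl_cons]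
    by_cases hc : x - p < 150
    · have hstep : pvStepA (g, c) x = (g, c ++ [x]) := by
        simp only [pvStepA, hp]
        rw [if_pos hc]
      rw [hstep, ih g (c ++ [x]) x (PySem.List.pyGetD_neg_one_append_singleton c x 0)]
      simp only [grpA]
      rw [if_pos hc]
      simp
    · have hstep : pvStepA (g, c) x = (g ++ [c], [x]) := by
        simp only [pvStepA, hp]
        rw [if_neg hc]
      have hone : PySem.List.pyGetD [x] (-1) 0 = x := by
        simpa using PySem.List.pyGetD_neg_one_append_singleton [] x 0
      rw [hstep, ih (g ++ [c]) [x] x hone]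
      simp only [grpA]
      rw [if_neg hc]
      simp

theorem pvB_eq_grpA : ∀ (t : List Int) (x : Int),
    group_continuous_less_than_10_alt (x :: t)
      = (x :: (grpA x t).headI) :: (grpA x t).tail := by
  intro t
  induction t with
  | nil =>
    intro x
    rw [pvB_eq_pairs]
    have hb : pvBreaks [x] = [] := by
      unfold pvBreaks
      rw [show (([x] : List Int).length : Int) = 1 by simp]
      rw [PySem.List.pyRange_one_eq_nil le_rfl]
      rfl
    rw [show pvBounds [x] = 0 :: (pvBreaks [x] ++ [(([x] : List Int).length : Int)]) from rfl, hb]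
    simp only [List.nil_append, pairsMap]
    rw [show (([x] : List Int).length : Int) = 0 + 1 by simp]
    rw [pvSlice_zero_cons x [] 0 le_rfl]
    simp [grpA, PySem.List.slice]
  | cons y t' ih =>
    intro x
    rw [pvB_struct, ih y]
    by_cases hc : y - x < 150
    · rw [if_pos hc]
      simp only [grpA]
      rw [if_pos hc]
    · rw [if_neg hc]
      simp only [grpA]
      rw [if_neg hc]
      simp

theorem pv_main (array : List Int) (hpre : array ≠ []) :
    group_continuous_less_than_10 array = group_continuous_less_than_10_alt array := by
  obtain ⟨a0, rest, rfl⟩ : ∃ a0 rest, array = a0 :: rest := by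
    cases array with
    | nil => exact absurd rfl hpre
    | cons a0 rest => exact ⟨a0, rest, rfl⟩
  unfold group_continuous_less_than_10
  have hfold : (PySem.List.pyRange 1 ((a0 :: rest).length : Int) 1).foldl
      (fun st i =>
        if PySem.List.pyGetD (a0 :: rest) i 0 - PySem.List.pyGetD st.2 (-1) 0 < 150 then
          (st.1, st.2 ++ [PySem.List.pyGetD (a0 :: rest) i 0])
        else
          (st.1 ++ [st.2], [PySem.List.pyGetD (a0 :: rest) i 0]))
      (([] : List (List Int)), [PySem.List.pyGetD (a0 :: rest) 0 0])
      = ((a0 :: rest).drop (1 : Int).toNat).foldl pvStepA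
          (([] : List (List Int)), [PySem.List.pyGetD (a0 :: rest) 0 0]) :=
    PySem.List.foldl_pyRange_pyGetD' (a := 1) (a0 :: rest) 0 pvStepA _ (by omega)
  rw [hfold]
  have h0 : PySem.List.pyGetD (a0 :: rest) 0 0 = a0 := PySem.List.pyGetD_zero_cons a0 rest 0
  rw [h0]
  have hone : PySem.List.pyGetD [a0] (-1) 0 = a0 := by
    simpa using PySem.List.pyGetD_neg_one_append_singleton [] a0 0
  have := pvA_inv (((a0 :: rest).drop (1 : Int).toNat)) [] [a0] a0 hone
  simp only [List.nil_append] at this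
  rw [show ((a0 :: rest).drop (1 : Int).toNat) = rest by simp] at this
  rw [show ((a0 :: rest).drop (1 : Int).toNat) = rest from by simp]
  rw [this, pvB_eq_grpA rest a0]
  rfl

-- ===== VERDICT (by name: the statement is the Claim_ definition above) =====
theorem group_continuous_less_than_10_spec : Claim_equal_group_continuous_less_than_10 := by
  intro array _ hpre
  unfold Spec_group_continuous_less_than_10
  exact pv_main array hpre
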